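-- pv_equiv track=rewrite | github.com/emarberg/schurp | tests/test_graphs.py | check_weyl_action
-- ===== SOURCE A (Python) =====
-- def istring_reflect(x, strings):
--     for s in strings:
--         if x in s:
--             i = [_ for _ in range(len(s)) if s[_] == x][0]
--             return s[len(s) - 1 - i]
--
-- def check_weyl_action(onestrings, twostrings):
--     if type(onestrings[0]) == int:
--         onestrings = list(onestrings)
--         for i in range(len(onestrings) - 1, -1, -1):
--             onestrings[i] = tuple(range(sum(onestrings[:i]), sum(onestrings[:i + 1])))
--         twostrings = [tuple(i - 1 for i in e) for e in twostrings]
--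
--     elems = {e for _ in onestrings for e in _} | {e for _ in twostrings for e in _}
--     for e in elems:
--         a = istring_reflect(istring_reflect(istring_reflect(e, onestrings), twostrings), onestrings)
--         b = istring_reflect(istring_reflect(istring_reflect(e, twostrings), onestrings), twostrings)
--         if a != b:
--             return False
--     return True
-- ===== SOURCE B (Python) =====
-- def _refl(strings):
--     # reflection map: x -> mirror of x within the FIRST string containing x
--     # (first occurrence inside that string wins, like istring_reflect in A)
--     r = {}
--     for s in strings:
--         n = len(s)
--         for i, x in enumerate(s):
--             if x not in r:
--                 r[x] = s[n - 1 - i]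
--     return r
--
--
-- def check_weyl_action(onestrings, twostrings):
--     if type(onestrings[0]) == int:
--         onestrings = list(onestrings)
--         for i in range(len(onestrings) - 1, -1, -1):
--             onestrings[i] = tuple(range(sum(onestrings[:i]), sum(onestrings[:i + 1])))
--         twostrings = [tuple(i - 1 for i in e) for e in twostrings]
--
--     r1 = _refl(onestrings)
--     r2 = _refl(twostrings)
--     elems = set(r1) | set(r2)
--
--     def compose(f, g):
--         # f after g on all of elems; a missing key yields None, and None propagates
--         return {e: f.get(g.get(e)) for e in elems}
--
--     p = compose(r1, compose(r2, {e: r1.get(e) for e in elems}))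
--     q = compose(r2, compose(r1, {e: r2.get(e) for e in elems}))
--     return p == q
-- ===== Notes on version B (the rewrite author's own statement) =====
-- stated objective: alternative
-- what changed: A rescans the string lists with istring_reflect three times for every element; B builds one reflection dictionary per string list once, then realises the two braid compositions by chained dictionary lookups (with None propagating for absent elements) and compares the two composed maps as dicts.
-- outside the precondition, e.g. on check_weyl_action([], [(1, 2)]): A raises IndexError, B raises IndexError
import Mathlib
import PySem

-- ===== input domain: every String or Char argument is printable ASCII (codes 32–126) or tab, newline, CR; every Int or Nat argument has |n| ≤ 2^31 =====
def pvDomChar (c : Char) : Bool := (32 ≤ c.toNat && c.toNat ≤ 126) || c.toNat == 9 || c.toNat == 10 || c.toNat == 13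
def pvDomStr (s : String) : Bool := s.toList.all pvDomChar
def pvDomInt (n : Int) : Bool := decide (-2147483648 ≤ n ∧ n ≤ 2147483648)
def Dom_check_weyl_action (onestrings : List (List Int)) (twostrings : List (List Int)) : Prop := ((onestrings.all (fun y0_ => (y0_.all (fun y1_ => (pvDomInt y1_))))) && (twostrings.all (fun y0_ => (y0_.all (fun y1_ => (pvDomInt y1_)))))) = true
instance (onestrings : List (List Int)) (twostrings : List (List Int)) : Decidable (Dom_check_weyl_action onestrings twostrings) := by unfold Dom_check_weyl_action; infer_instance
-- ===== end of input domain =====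

-- B replaces A's triple istring_reflect rescans per element by two reflection dictionaries
-- built once and composed into the two sides of the braid identity (objective: alternative).

-- ===== PORT A =====
-- x may be Python None (istring_reflect's own result): 'None in s' is False for a list of ints,
-- so a none input falls through every string and returns none.
def istring_reflect (x : Option Int) (strings : List (List Int)) : Option Int :=
  match strings with
  | [] => none
  | s :: rest =>
    match x with
    | none => istring_reflect none rest
    | some v =>
      if s.contains v then
        -- i = [_ for _ in range(len(s)) if s[_] == x][0]; the filtered list is nonempty since v ∈ s
        match (PySem.List.pyRange 0 s.length 1).filter (fun j => decide (PySem.List.pyGetD s j 0 = v)) with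
        | i :: _ => PySem.List.pyGet? s ((s.length : Int) - 1 - i)
        | [] => none
      else istring_reflect (some v) rest

-- the for-loop over elems with its early 'return False'
def cwaLoop (ones twos : List (List Int)) : List Int → Bool
  | [] => true
  | e :: rest =>
    let a := istring_reflect (istring_reflect (istring_reflect (some e) ones) twos) ones
    let b := istring_reflect (istring_reflect (istring_reflect (some e) twos) ones) twos
    if a ≠ b then false else cwaLoop ones twos rest

-- A's 'type(onestrings[0]) == int' normalization branch is statically False under the
-- List (List Int) typing (every element is a list); Pre_ excludes onestrings = [], where
-- that subscript raises IndexError.  Iterating the set elems is order-safe: the loop's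
-- result (an all-quantified Bool) does not depend on iteration order (proved below).
def check_weyl_action (onestrings : List (List Int)) (twostrings : List (List Int)) : Bool :=
  let elems := PySem.Set.union (PySem.Set.ofList (onestrings.flatMap id)) (PySem.Set.ofList (twostrings.flatMap id))
  cwaLoop onestrings twostrings elems

-- ===== PORT B =====
-- _refl: one dict mapping x -> its mirror in the first string containing x (first occurrence wins)
def buildRefl (strings : List (List Int)) : PySem.Dict Int Int :=
  strings.foldl (fun r s =>
    (PySem.List.enumerate s).foldl (fun r p =>
      if r.contains p.2 then r
      else r.insert p.2 (PySem.List.pyGetD s ((s.length : Int) - 1 - p.1) 0)) r)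
    PySem.Dict.empty

-- compose(f, g): {e: f.get(g.get(e)) for e in elems}; a dict with Option values is an
-- assoc list (keys = elems, in order), g.get = first-match lookup, f.get(None) = None.
def composeM (f : PySem.Dict Int Int) (g : List (Int × Option Int)) (elems : List Int) : List (Int × Option Int) :=
  elems.map (fun e => (e, ((List.lookup e g).join).bind (fun v => f.get? v)))

-- p == q: Python dict equality ignores order, but p and q have identical keys in identical
-- order (both comprehensions over elems), so it is plain equality of the assoc lists.
def check_weyl_action_alt (onestrings : List (List Int)) (twostrings : List (List Int)) : Bool :=
  let r1 := buildRefl onestrings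
  let r2 := buildRefl twostrings
  let elems := PySem.Set.union (PySem.Set.ofList (PySem.Dict.keys r1)) (PySem.Set.ofList (PySem.Dict.keys r2))
  let base1 : List (Int × Option Int) := elems.map (fun e => (e, r1.get? e))
  let base2 : List (Int × Option Int) := elems.map (fun e => (e, r2.get? e))
  let p := composeM r1 (composeM r2 base1 elems) elems
  let q := composeM r2 (composeM r1 base2 elems) elems
  p == q

-- ===== PRECONDITION & SPEC =====
-- Pre_ excludes only onestrings = [], where both Pythons raise IndexError on onestrings[0].
def Pre_check_weyl_action (onestrings : List (List Int)) (twostrings : List (List Int)) : Prop :=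
  onestrings ≠ []
instance (onestrings : List (List Int)) (twostrings : List (List Int)) : Decidable (Pre_check_weyl_action onestrings twostrings) := by unfold Pre_check_weyl_action; infer_instance
def pvWitness_check_weyl_action : List (List Int) × List (List Int) := ([[0, 1]], [[1, 2]])
def Spec_check_weyl_action (onestrings : List (List Int)) (twostrings : List (List Int)) (out : Bool) : Prop := out = check_weyl_action_alt onestrings twostrings
instance (onestrings : List (List Int)) (twostrings : List (List Int)) (out : Bool) : Decidable (Spec_check_weyl_action onestrings twostrings out) := by unfold Spec_check_weyl_action; infer_instance

-- ===== CLAIM (what is proved, stated in full; the proofs are below) =====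
def Claim_equal_check_weyl_action : Prop := ∀ (onestrings : List (List Int)) (twostrings : List (List Int)), Dom_check_weyl_action onestrings twostrings → Pre_check_weyl_action onestrings twostrings → Spec_check_weyl_action onestrings twostrings (check_weyl_action onestrings twostrings)

-- ===== LEMMAS AND PROOFS =====

theorem isr_none (ss : List (List Int)) : istring_reflect none ss = none := by
  induction ss with
  | nil => rfl
  | cons s rest ih => simpa [istring_reflect] using ih

-- the mirror value both programs compute for v inside string s (first index of v)
def reflSpec (s : List Int) (v : Int) : Option Int :=
  (List.idxOf? v s).bind (fun i => s[s.length - 1 - i]?)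

theorem idxOf?_lt_len (s : List Int) (v : Int) (i : Nat) (h : List.idxOf? v s = some i) :
    i < s.length := by
  induction s generalizing i with
  | nil => simp [List.idxOf?] at h
  | cons a t ih =>
    rw [List.idxOf?_cons] at h
    by_cases hav : a == v
    · simp [hav] at h; subst h; simp
    · simp [hav] at h
      obtain ⟨j, hj, rfl⟩ := h
      have := ih j hj
      simp; omega

theorem range_filter_head (s : List Int) (v : Int) :
    ((List.range s.length).filter (fun k => decide (s.getD k 0 = v))).head? = List.idxOf? v s := by
  induction s with
  | nil => simp [List.idxOf?]
  | cons a t ih =>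
    rw [List.length_cons, List.range_succ_eq_map, List.idxOf?_cons]
    by_cases hav : a = v
    · simp [hav]
    · have hba : (a == v) = false := beq_false_of_ne hav
      simp only [List.filter_cons, List.getD_cons_zero, decide_eq_true_eq, hav, if_false, hba,
        List.filter_map, Bool.false_eq_true]
      rw [List.head?_map, ← ih]
      congr 1

theorem filter_range_head (s : List Int) (v : Int) :
    ((PySem.List.pyRange 0 s.length 1).filter (fun j => decide (PySem.List.pyGetD s j 0 = v))).head?
      = (List.idxOf? v s).map (fun i => (i : Int)) := by
  rw [PySem.List.pyRange_one]
  simp only [Int.sub_zero, Int.toNat_natCast, List.filter_map, List.head?_map, zero_add]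
  rw [List.filter_congr (l := List.range s.length) (q := fun k => decide (s.getD k 0 = v))
        (by intro k hk; simp), range_filter_head s v]
  cases List.idxOf? v s <;> rfl

theorem isr_cons (s : List Int) (rest : List (List Int)) (v : Int) :
    istring_reflect (some v) (s :: rest)
      = if v ∈ s then reflSpec s v else istring_reflect (some v) rest := by
  by_cases hm : v ∈ s
  · have hc : s.contains v = true := by simpa using hm
    obtain ⟨i, hi⟩ := Option.isSome_iff_exists.mp (List.isSome_idxOf?.mpr hm)
    have hlt := idxOf?_lt_len s v i hi
    have hhead : ((PySem.List.pyRange 0 s.length 1).filter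
        (fun j => decide (PySem.List.pyGetD s j 0 = v))).head? = some (i : Int) := by
      rw [filter_range_head, hi]; rfl
    cases hfl : (PySem.List.pyRange 0 s.length 1).filter
        (fun j => decide (PySem.List.pyGetD s j 0 = v)) with
    | nil => rw [hfl] at hhead; simp at hhead
    | cons a tl =>
      rw [hfl] at hhead
      simp only [List.head?_cons, Option.some.injEq] at hhead
      subst hhead
      simp only [istring_reflect, hc, if_true, hfl, hm, reflSpec, hi, Option.bind_some]
      rw [show ((s.length : Int) - 1 - (i : Int)) = ((s.length - 1 - i : Nat) : Int) by omega]
      exact PySem.List.pyGet?_natCast s (s.length - 1 - i)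
  · have hc : s.contains v = false := by simpa using hm
    simp [istring_reflect, hc, hm]

-- B inner loop characterization
theorem inner_char (s : List Int) (t : List Int) (k : Int) (r : PySem.Dict Int Int) (x : Int) :
    ((PySem.List.enumerate t k).foldl (fun r p =>
        if r.contains p.2 then r
        else r.insert p.2 (PySem.List.pyGetD s ((s.length : Int) - 1 - p.1) 0)) r).get? x
      = if (r.get? x).isSome then r.get? x
        else (List.idxOf? x t).map (fun i => PySem.List.pyGetD s ((s.length : Int) - 1 - (k + i)) 0) := by
  induction t generalizing k r with
  | nil =>
    simp only [PySem.List.enumerate_nil, List.foldl_nil, List.idxOf?_nil, Option.map_none]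
    cases hr : r.get? x <;> simp
  | cons y ys ih =>
    rw [PySem.List.enumerate_cons, List.foldl_cons]
    by_cases hc : r.contains y
    · simp only [hc, if_true]
      rw [ih (k + 1) r]
      cases hr : r.get? x with
      | some w => simp
      | none =>
        have hisr : (r.get? x).isSome = false := by simp [hr]
        rw [List.idxOf?_cons]
        by_cases hyx : y = x
        · exfalso
          rw [hyx] at hc
          rw [PySem.Dict.contains_eq_isSome_get?, hr] at hc
          simp at hc
        · have : (y == x) = false := beq_false_of_ne hyx
          simp only [this, Bool.false_eq_true, if_false, hr, Option.isSome_none, Option.map_map]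
          cases hio : List.idxOf? x ys with
          | none => rfl
          | some i =>
            have harg : ((s.length : Int) - 1 - (k + 1 + (i : Int)))
                = ((s.length : Int) - 1 - (k + ((i : Int) + 1))) := by ring
            simp [hio, harg]
    · simp only [hc, Bool.false_eq_true, if_false]
      rw [ih (k + 1) (r.insert y (PySem.List.pyGetD s ((s.length : Int) - 1 - k) 0))]
      by_cases hyx : x = y
      · subst hyx
        rw [PySem.Dict.get?_insert_self]
        have hr : r.get? x = none := by
          rw [PySem.Dict.contains_eq_isSome_get?] at hc
          cases h' : r.get? x <;> simp [h'] at hc ⊢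
        rw [hr]
        rw [List.idxOf?_cons]
        simp
      · rw [PySem.Dict.get?_insert_of_ne _ _ hyx]
        cases hr : r.get? x with
        | some w => simp
        | none =>
          rw [List.idxOf?_cons]
          have : (y == x) = false := beq_false_of_ne (fun h => hyx h.symm)
          simp only [this, Bool.false_eq_true, if_false, Option.isSome_none, Option.map_map]
          cases hio : List.idxOf? x ys with
          | none => rfl
          | some i =>
            have harg : ((s.length : Int) - 1 - (k + 1 + (i : Int)))
                = ((s.length : Int) - 1 - (k + ((i : Int) + 1))) := by ring
            simp [hio, harg]

theorem outer_char (ss : List (List Int)) (r : PySem.Dict Int Int) (x : Int) :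
    ((ss.foldl (fun r s =>
        (PySem.List.enumerate s).foldl (fun r p =>
          if r.contains p.2 then r
          else r.insert p.2 (PySem.List.pyGetD s ((s.length : Int) - 1 - p.1) 0)) r) r).get? x)
      = if (r.get? x).isSome then r.get? x else istring_reflect (some x) ss := by
  induction ss generalizing r with
  | nil =>
    simp only [List.foldl_nil, istring_reflect]
    cases hr : r.get? x <;> simp
  | cons s rest ih =>
    rw [List.foldl_cons, ih, inner_char s s 0 r x, isr_cons]
    cases hr : r.get? x with
    | some w => simp
    | none =>
      simp only [Option.isSome_none, Bool.false_eq_true, if_false]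
      by_cases hm : x ∈ s
      · obtain ⟨i, hi⟩ := Option.isSome_iff_exists.mp (List.isSome_idxOf?.mpr hm)
        have hlt := idxOf?_lt_len s x i hi
        have harg : ((s.length : Int) - 1 - (0 + (i : Int))) = ((s.length - 1 - i : Nat) : Int) := by
          omega
        simp [hi, hm, reflSpec, harg, PySem.List.pyGetD_natCast,
          List.getElem?_eq_getElem (show s.length - 1 - i < s.length by omega)]
        rw [show ((s.length : Int) - 1 - (i : Int)) = ((s.length - 1 - i : Nat) : Int) by omega,
          PySem.List.pyGetD_natCast, List.getD_eq_getElem _ _ (show s.length - 1 - i < s.length by omega)]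
      · have hnone : List.idxOf? x s = none := by
          cases h' : List.idxOf? x s with
          | none => rfl
          | some j =>
            exfalso; exact hm (List.isSome_idxOf?.mp (by simp [h']))
        simp [hnone, hm]

theorem get?_buildRefl (ss : List (List Int)) (x : Int) :
    (buildRefl ss).get? x = istring_reflect (some x) ss := by
  simpa [buildRefl, PySem.Dict.get?_empty] using outer_char ss PySem.Dict.empty x

theorem isr_isSome_iff (ss : List (List Int)) (x : Int) :
    (istring_reflect (some x) ss).isSome = true ↔ ∃ s ∈ ss, x ∈ s := by
  induction ss with
  | nil => simp [istring_reflect]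
  | cons s rest ih =>
    rw [isr_cons]
    by_cases hm : x ∈ s
    · obtain ⟨i, hi⟩ := Option.isSome_iff_exists.mp (List.isSome_idxOf?.mpr hm)
      have hlt := idxOf?_lt_len s x i hi
      simp only [hm, if_true, reflSpec, hi, Option.bind_some]
      rw [List.getElem?_eq_getElem (show s.length - 1 - i < s.length by omega)]
      simp only [Option.isSome_some, true_iff]
      exact ⟨s, by simp, hm⟩
    · simp only [hm, if_false]
      rw [ih]
      constructor
      · rintro ⟨t, ht, hxt⟩; exact ⟨t, List.mem_cons_of_mem _ ht, hxt⟩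
      · rintro ⟨t, ht, hxt⟩
        rcases List.mem_cons.mp ht with rfl | ht'
        · exact absurd hxt hm
        · exact ⟨t, ht', hxt⟩

theorem lookup_map_self {β : Type} (l : List Int) (v : Int → β) (e : Int) (he : e ∈ l) :
    List.lookup e (l.map (fun x => (x, v x))) = some (v e) := by
  induction l with
  | nil => cases he
  | cons a t ih =>
    by_cases h : e = a
    · subst h; simp [List.lookup]
    · have ht : e ∈ t := by
        rcases List.mem_cons.1 he with h' | h'
        · exact absurd h' h
        · exact h'
      have hba : (e == a) = false := beq_false_of_ne h
      simpa [List.lookup_cons, hba] using ih ht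

theorem cwaLoop_eq_all (ones twos : List (List Int)) (l : List Int) :
    cwaLoop ones twos l = l.all (fun e =>
      istring_reflect (istring_reflect (istring_reflect (some e) ones) twos) ones
        == istring_reflect (istring_reflect (istring_reflect (some e) twos) ones) twos) := by
  induction l with
  | nil => rfl
  | cons e rest ih =>
    by_cases h : istring_reflect (istring_reflect (istring_reflect (some e) ones) twos) ones
        = istring_reflect (istring_reflect (istring_reflect (some e) twos) ones) twos
    · simp [cwaLoop, h, ih]
    · simp [cwaLoop, h]

theorem isr_bind (x : Option Int) (ss : List (List Int)) :
    istring_reflect x ss = x.bind (fun v => istring_reflect (some v) ss) := by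
  cases x with
  | none => simp [isr_none]
  | some v => rfl

theorem mem_keys_buildRefl (ss : List (List Int)) (x : Int) :
    x ∈ (buildRefl ss).keys ↔ x ∈ ss.flatMap id := by
  rw [← PySem.Dict.contains_iff_mem_keys, PySem.Dict.contains_eq_isSome_get?, get?_buildRefl]
  rw [show ((istring_reflect (some x) ss).isSome = true) ↔ _ from isr_isSome_iff ss x]
  simp [List.mem_flatMap]

theorem chain_eq (o t : List (List Int)) (e : Int) :
    istring_reflect (istring_reflect (istring_reflect (some e) o) t) o
      = (((buildRefl o).get? e).bind (fun v => (buildRefl t).get? v)).bind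
          (fun v => (buildRefl o).get? v) := by
  rw [isr_bind (istring_reflect (istring_reflect (some e) o) t) o,
    isr_bind (istring_reflect (some e) o) t]
  simp only [← get?_buildRefl]

-- ===== VERDICT (by name: the statement is the Claim_ definition above) =====
theorem check_weyl_action_spec : Claim_equal_check_weyl_action := by
  intro ones twos _ _
  unfold Spec_check_weyl_action
  rw [check_weyl_action, check_weyl_action_alt]
  simp only [composeM, cwaLoop_eq_all]
  have hmem : ∀ x : Int,
      x ∈ PySem.Set.union (PySem.Set.ofList (ones.flatMap id)) (PySem.Set.ofList (twos.flatMap id))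
        ↔ x ∈ PySem.Set.union (PySem.Set.ofList (PySem.Dict.keys (buildRefl ones)))
            (PySem.Set.ofList (PySem.Dict.keys (buildRefl twos))) := by
    intro x
    simp only [PySem.Set.mem_union, PySem.Set.mem_ofList, mem_keys_buildRefl]
  apply Bool.eq_iff_iff.2
  simp only [beq_iff_eq, List.all_eq_true, List.map_inj_left, Prod.mk.injEq, true_and]
  constructor
  · intro h e he
    rw [lookup_map_self _ _ _ he, lookup_map_self _ _ _ he]
    simp only [Option.join_some]
    rw [lookup_map_self _ _ _ he, lookup_map_self _ _ _ he]
    simp only [Option.join_some]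
    rw [← chain_eq, ← chain_eq]
    exact h e ((hmem e).2 he)
  · intro h e he
    have he2 := (hmem e).1 he
    have := h e he2
    rw [lookup_map_self _ _ _ he2, lookup_map_self _ _ _ he2] at this
    simp only [Option.join_some] at this
    rw [lookup_map_self _ _ _ he2, lookup_map_self _ _ _ he2] at this
    simp only [Option.join_some] at this
    rw [chain_eq, chain_eq]
    exact this
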